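-- pv_equiv track=rewrite | github.com/preke/DesPrompt | src/verbalizer.py | delete_common_words
-- ===== SOURCE A (Python) =====
-- def delete_common_words(d):
--     word_count = {}
--     for d_perclass in d:
--         for w in d_perclass:
--             if w not in word_count:
--                 word_count[w]=1
--             else:
--                 word_count[w]+=1
--     for w in word_count:
--         if word_count[w]>=2:
--             for d_perclass in d:
--                 if w in d_perclass[1:]:
--                     findidx = d_perclass[1:].index(w)
--                     d_perclass.pop(findidx+1)
--     return d
-- ===== SOURCE B (Python) =====
-- def delete_common_words(d):
--     # One global count pass, then one linear pass per class with a seen-set.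
--     # Mutates each class list in place (like A) and returns d.
--     count = {}
--     for cls in d:
--         for w in cls:
--             count[w] = count.get(w, 0) + 1
--     for cls in d:
--         removed = set()
--         tail = []
--         for w in cls[1:]:
--             if count[w] >= 2 and w not in removed:
--                 removed.add(w)
--             else:
--                 tail.append(w)
--         cls[1:] = tail
--     return d
-- ===== Notes on version B (the rewrite author's own statement) =====
-- stated objective: faster
-- what changed: A rescans every class (slicing, membership test, index search, pop) once per globally-duplicated word; B counts all words in one dict pass and then rewrites each class tail in a single linear pass with a per-class seen-set.
import Mathlib
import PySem

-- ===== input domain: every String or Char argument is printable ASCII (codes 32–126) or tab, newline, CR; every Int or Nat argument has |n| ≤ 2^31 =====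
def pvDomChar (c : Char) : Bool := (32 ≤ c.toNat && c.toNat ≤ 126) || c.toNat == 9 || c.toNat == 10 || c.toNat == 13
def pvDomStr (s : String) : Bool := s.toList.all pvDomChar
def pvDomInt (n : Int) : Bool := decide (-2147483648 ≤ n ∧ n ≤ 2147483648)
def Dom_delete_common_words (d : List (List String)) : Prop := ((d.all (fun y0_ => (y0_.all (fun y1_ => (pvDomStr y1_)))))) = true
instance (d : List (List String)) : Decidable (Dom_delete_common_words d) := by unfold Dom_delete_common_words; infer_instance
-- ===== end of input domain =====

-- B replaces A's per-duplicated-word rescan of every class by one global count pass plus one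
-- linear seen-set pass per class (same return value; in Python both mutate the class lists in place).


-- ===== PORT A =====
-- word_count accumulation loop of A
def aCount (d : List (List String)) : PySem.Dict String Int :=
  d.foldl (fun wc d_perclass =>
    d_perclass.foldl (fun wc w =>
      if wc.contains w = false then wc.insert w 1
      else wc.insert w (wc.getD w 0 + 1)) wc) PySem.Dict.empty

-- body of the per-class mutation: if w in d_perclass[1:]: pop(index+1)
def aRemove (w : String) (d_perclass : List String) : List String :=
  let t := PySem.List.slice d_perclass (some 1) none
  if t.contains w then
    match PySem.List.index? t w with
    | some findidx =>
      match PySem.List.pop? d_perclass ((findidx : Int) + 1) with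
      | some r => r.2
      | none => d_perclass    -- unreachable (index in range)
    | none => d_perclass      -- unreachable (w ∈ t)
  else d_perclass

def delete_common_words (d : List (List String)) : List (List String) :=
  let word_count := aCount d
  (PySem.Dict.keys word_count).foldl (fun d w =>
    if 2 ≤ word_count.getD w 0 then d.map (aRemove w) else d) d

-- ===== PORT B =====
def bCount (d : List (List String)) : PySem.Dict String Int :=
  d.foldl (fun count cls =>
    cls.foldl (fun count w => count.insert w (count.getD w 0 + 1)) count) PySem.Dict.empty

def delete_common_words_alt (d : List (List String)) : List (List String) :=
  let count := bCount d
  d.map (fun cls =>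
    let st := (PySem.List.slice cls (some 1) none).foldl
      (fun (st : PySem.Set String × List String) w =>
        if 2 ≤ count.getD w 0 ∧ st.1.contains w = false
        then (st.1.add w, st.2)
        else (st.1, st.2 ++ [w]))
      (PySem.Set.empty, [])
    cls.take 1 ++ st.2)

-- ===== PRECONDITION & SPEC =====
def Spec_delete_common_words (d : List (List String)) (out : List (List String)) : Prop := out = delete_common_words_alt d
instance (d : List (List String)) (out : List (List String)) : Decidable (Spec_delete_common_words d out) := by unfold Spec_delete_common_words; infer_instance

-- ===== CLAIM (what is proved, stated in full; the proofs are below) =====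
def Claim_equal_delete_common_words : Prop := ∀ (d : List (List String)), Dom_delete_common_words d → Spec_delete_common_words d (delete_common_words d)

-- ===== LEMMAS AND PROOFS =====

-- the two counting loops build the same dict
theorem aCount_eq_bCount (d : List (List String)) : aCount d = bCount d := by
  have hstep : (fun (wc : PySem.Dict String Int) (w : String) =>
      if wc.contains w = false then wc.insert w 1 else wc.insert w (wc.getD w 0 + 1))
      = (fun (wc : PySem.Dict String Int) (w : String) => wc.insert w (wc.getD w 0 + 1)) := by
    funext wc w
    by_cases h : wc.contains w = true
    · simp [h]
    · simp only [Bool.not_eq_true] at h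
      simp [h, PySem.Dict.getD_of_not_contains wc 0 h]
  unfold aCount bCount
  rw [hstep]

-- A's fold over the words, restricted to one class
def rmFold (wc : PySem.Dict String Int) (ks : List String) (cls : List String) : List String :=
  ks.foldl (fun c w => if 2 ≤ wc.getD w 0 then aRemove w c else c) cls

-- the same fold acting on the tail only, as erase-steps
def eFold (wc : PySem.Dict String Int) (ks : List String) (t : List String) : List String :=
  ks.foldl (fun t w => if 2 ≤ wc.getD w 0 then t.erase w else t) t

-- B's per-class pass, recursively (seen-set filter)
def bTail (wc : PySem.Dict String Int) (seen : PySem.Set String) : List String → List String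
  | [] => []
  | w :: t => if 2 ≤ wc.getD w 0 ∧ seen.contains w = false
              then bTail wc (seen.add w) t
              else w :: bTail wc seen t

theorem aRemove_nil (w : String) : aRemove w [] = [] := by
  simp [aRemove, PySem.List.slice_from_one]

theorem aRemove_cons (w h : String) (t : List String) : aRemove w (h :: t) = h :: t.erase w := by
  unfold aRemove
  simp only [PySem.List.slice_from_one, List.tail_cons]
  by_cases hw : w ∈ t
  · have hc : t.contains w = true := List.contains_iff_mem.2 hw
    simp only [hc, if_true]
    have hsome : PySem.List.index? t w ≠ none := by
      intro hn; rw [PySem.List.index?_eq_none_iff] at hn; exact hn hw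
    cases hidx : PySem.List.index? t w with
    | none => exact absurd hidx hsome
    | some k =>
      obtain ⟨pre, suf, ht, hk, hpre⟩ := (PySem.List.index?_eq_some_iff t w k).1 hidx
      subst ht; subst hk
      have hcast : ((pre.length : Int) + 1) = ((pre.length + 1 : Nat) : Int) := by push_cast; ring
      have hlen : pre.length + 1 < (h :: (pre ++ w :: suf)).length := by simp
      show (match PySem.List.pop? (h :: (pre ++ w :: suf)) ((pre.length : Int) + 1) with
            | some r => r.2
            | none => h :: (pre ++ w :: suf)) = h :: (pre ++ w :: suf).erase w
      rw [hcast, PySem.List.pop?_natCast _ _ hlen]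
      show (h :: (pre ++ w :: suf)).eraseIdx (pre.length + 1) = h :: (pre ++ w :: suf).erase w
      rw [List.eraseIdx_cons_succ, List.eraseIdx_append_of_length_le (le_refl _),
          List.erase_append_right _ hpre]
      simp
  · have hc : t.contains w = false := by
      simp only [Bool.eq_false_iff]; intro hcc; exact hw (List.contains_iff_mem.1 hcc)
    simp only [hc, List.erase_of_not_mem hw]
    simp

-- A's outer fold commutes with the map over classes
theorem foldl_map_comm (wc : PySem.Dict String Int) (ks : List String) (d : List (List String)) :
    ks.foldl (fun d w => if 2 ≤ wc.getD w 0 then d.map (aRemove w) else d) d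
      = d.map (fun c => rmFold wc ks c) := by
  induction ks generalizing d with
  | nil => simp [rmFold]
  | cons w ks ih =>
    simp only [List.foldl_cons]
    by_cases hb : 2 ≤ wc.getD w 0
    · rw [if_pos hb, ih, List.map_map]
      exact List.map_congr_left (fun c _ => by simp [rmFold, Function.comp, hb])
    · rw [if_neg hb, ih]
      exact List.map_congr_left (fun c _ => by simp [rmFold, hb])

theorem eFold_nil (wc : PySem.Dict String Int) (ks : List String) : eFold wc ks [] = [] := by
  induction ks with
  | nil => rfl
  | cons w ks ih => simp [eFold, List.erase_nil] at ih ⊢; exact ih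

-- rmFold keeps the head and erase-folds the tail
theorem rmFold_eq (wc : PySem.Dict String Int) (ks : List String) (cls : List String) :
    rmFold wc ks cls = cls.take 1 ++ eFold wc ks cls.tail := by
  cases cls with
  | nil =>
    simp only [List.take_nil, List.tail_nil, List.nil_append, eFold_nil]
    induction ks with
    | nil => rfl
    | cons w ks ih => simp [rmFold, aRemove_nil] at ih ⊢; exact ih
  | cons h t =>
    simp only [List.tail_cons]
    induction ks generalizing t with
    | nil => rfl
    | cons w ks ih =>
      simp only [rmFold, eFold, List.foldl_cons] at ih ⊢
      by_cases hb : 2 ≤ wc.getD w 0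
      · simp only [hb, if_true, aRemove_cons]; exact ih _
      · simp only [hb, if_false]; exact ih _

theorem eFold_cons_mem (wc : PySem.Dict String Int) (ks : List String) (w : String)
    (hm : w ∈ ks) (hnd : ks.Nodup) :
    ∀ t : List String, 2 ≤ wc.getD w 0 →
    eFold wc ks (w :: t) = eFold wc (ks.erase w) t := by
  induction ks with
  | nil => simp at hm
  | cons v ks ih =>
    intro t hb
    by_cases hv : v = w
    · subst hv
      simp only [List.erase_cons_head, eFold, List.foldl_cons, hb, if_true]
    · have hm' : w ∈ ks := by cases hm with
        | head => exact absurd rfl hv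
        | tail _ h => exact h
      have hnd' : ks.Nodup := (List.nodup_cons.1 hnd).2
      have hbne : ((w == v) = false) := beq_false_of_ne (Ne.symm hv)
      have hbne' : ((v == w) = false) := beq_false_of_ne hv
      rw [show (v :: ks).erase w = v :: ks.erase w from
        List.erase_cons_tail (by simp [hbne'])]
      simp only [eFold, List.foldl_cons]
      by_cases hbv : 2 ≤ wc.getD v 0
      · rw [if_pos hbv, if_pos hbv, List.erase_cons_tail (by simp [hbne])]
        exact ih hm' hnd' (t.erase v) hb
      · rw [if_neg hbv, if_neg hbv]
        exact ih hm' hnd' t hb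

theorem eFold_cons_skip (wc : PySem.Dict String Int) (ks : List String) (w : String)
    (hn : ¬(2 ≤ wc.getD w 0 ∧ w ∈ ks)) :
    ∀ t : List String, eFold wc ks (w :: t) = w :: eFold wc ks t := by
  induction ks with
  | nil => intro t; rfl
  | cons v ks ih =>
    intro t
    simp only [eFold, List.foldl_cons]
    by_cases hv : v = w
    · subst hv
      have hnb : ¬ 2 ≤ wc.getD v 0 := fun hb => hn ⟨hb, List.mem_cons_self⟩
      rw [if_neg hnb, if_neg hnb]
      exact ih (fun ⟨hb, _⟩ => hnb hb) t
    · have hn' : ¬(2 ≤ wc.getD w 0 ∧ w ∈ ks) := fun ⟨hb, hm⟩ => hn ⟨hb, List.mem_cons_of_mem _ hm⟩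
      have hbne : ((w == v) = false) := beq_false_of_ne (Ne.symm hv)
      by_cases hbv : 2 ≤ wc.getD v 0
      · rw [if_pos hbv, if_pos hbv, List.erase_cons_tail (by simp [hbne])]
        exact ih hn' (t.erase v)
      · rw [if_neg hbv, if_neg hbv]
        exact ih hn' t

-- core: the erase-fold over the (nodup) word list equals B's seen-set pass
theorem eFold_eq_bTail (wc : PySem.Dict String Int) (t : List String) :
    ∀ (ks : List String) (seen : PySem.Set String), ks.Nodup →
    (∀ w ∈ t, (w ∈ ks ↔ w ∉ seen)) →
    eFold wc ks t = bTail wc seen t := by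
  induction t with
  | nil => intro ks seen _ _; simp [eFold_nil, bTail]
  | cons w t ih =>
    intro ks seen hnd hinv
    by_cases hc : 2 ≤ wc.getD w 0 ∧ w ∉ seen
    · have hmk : w ∈ ks := (hinv w List.mem_cons_self).2 hc.2
      have hcf : seen.contains w = false := by
        rw [Bool.eq_false_iff]; intro hcc; exact hc.2 ((PySem.Set.contains_iff seen w).1 hcc)
      rw [eFold_cons_mem wc ks w hmk hnd t hc.1]
      rw [show bTail wc seen (w :: t) = bTail wc (seen.add w) t from by
        simp only [bTail]; rw [if_pos ⟨hc.1, hcf⟩]]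
      apply ih _ _ (hnd.erase w)
      intro v hv
      rw [List.Nodup.mem_erase_iff hnd, PySem.Set.mem_add]
      have hiv := hinv v (List.mem_cons_of_mem _ hv)
      constructor
      · rintro ⟨hne, hvk⟩ (h | h)
        · exact (hiv.1 hvk) h
        · exact hne h
      · intro hna
        have hvs : v ∉ seen := fun h => hna (Or.inl h)
        have hne : v ≠ w := fun h => hna (Or.inr h)
        exact ⟨hne, hiv.2 hvs⟩
    · have hnk : ¬(2 ≤ wc.getD w 0 ∧ w ∈ ks) := by
        rintro ⟨hb, hm⟩
        exact hc ⟨hb, (hinv w List.mem_cons_self).1 hm⟩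
      rw [eFold_cons_skip wc ks w hnk t]
      have hcond : ¬(2 ≤ wc.getD w 0 ∧ seen.contains w = false) := by
        rintro ⟨hb, hcf⟩
        refine hc ⟨hb, fun hm => ?_⟩
        rw [(PySem.Set.contains_iff seen w).2 hm] at hcf
        cases hcf
      rw [show bTail wc seen (w :: t) = w :: bTail wc seen t from by
        simp only [bTail]; rw [if_neg hcond]]
      exact congrArg (w :: ·) (ih ks seen hnd (fun v hv => hinv v (List.mem_cons_of_mem _ hv)))

-- B's pair-accumulator fold computes bTail
theorem bFold_pair (wc : PySem.Dict String Int) (t : List String) :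
    ∀ (seen : PySem.Set String) (acc : List String),
    (t.foldl (fun (st : PySem.Set String × List String) w =>
        if 2 ≤ wc.getD w 0 ∧ st.1.contains w = false
        then (st.1.add w, st.2)
        else (st.1, st.2 ++ [w])) (seen, acc)).2 = acc ++ bTail wc seen t := by
  induction t with
  | nil => intro seen acc; simp [bTail]
  | cons w t ih =>
    intro seen acc
    simp only [List.foldl_cons]
    by_cases hc : 2 ≤ wc.getD w 0 ∧ seen.contains w = false
    · rw [if_pos hc, ih]
      simp only [bTail]; rw [if_pos hc]
    · rw [if_neg hc, ih]
      simp only [bTail]; rw [if_neg hc]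
      simp

-- every word appearing in some class of d is a key of bCount d
theorem contains_inner_mono (cls : List String) (w : String) :
    ∀ wc : PySem.Dict String Int, wc.contains w = true →
    (cls.foldl (fun count v => count.insert v (count.getD v 0 + 1)) wc).contains w = true := by
  induction cls with
  | nil => intro wc h; exact h
  | cons v cls ih =>
    intro wc h
    exact ih _ (by simp [PySem.Dict.contains_insert, h])

theorem contains_inner (cls : List String) (w : String) (hw : w ∈ cls) :
    ∀ wc : PySem.Dict String Int,
    (cls.foldl (fun count v => count.insert v (count.getD v 0 + 1)) wc).contains w = true := by
  induction cls with
  | nil => simp at hw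
  | cons v cls ih =>
    intro wc
    by_cases hv : w = v
    · subst hv
      exact contains_inner_mono cls w _ (by simp)
    · have hw' : w ∈ cls := by cases hw with
        | head => exact absurd rfl hv
        | tail _ h => exact h
      exact ih hw' _

theorem contains_outer_mono (d : List (List String)) (w : String) :
    ∀ wc : PySem.Dict String Int, wc.contains w = true →
    (d.foldl (fun count cls =>
      cls.foldl (fun count v => count.insert v (count.getD v 0 + 1)) count) wc).contains w = true := by
  induction d with
  | nil => intro wc h; exact h
  | cons cls d ih => intro wc h; exact ih _ (contains_inner_mono cls w wc h)

theorem contains_bfold (d : List (List String)) (w : String) :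
    ∀ wc : PySem.Dict String Int, (∃ cls ∈ d, w ∈ cls) →
    (d.foldl (fun count cls =>
      cls.foldl (fun count v => count.insert v (count.getD v 0 + 1)) count) wc).contains w = true := by
  induction d with
  | nil => rintro wc ⟨cls, h, _⟩; simp at h
  | cons c d ih =>
    rintro wc ⟨cls, hcls, hw⟩
    simp only [List.foldl_cons]
    cases hcls with
    | head => exact contains_outer_mono d w _ (contains_inner c w hw _)
    | tail _ hmem => exact ih _ ⟨cls, hmem, hw⟩

theorem contains_bCount (d : List (List String)) (cls : List String) (w : String)
    (hcls : cls ∈ d) (hw : w ∈ cls) : (bCount d).contains w = true :=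
  contains_bfold d w _ ⟨cls, hcls, hw⟩

-- keys of bCount are nodup
theorem nodup_inner (cls : List String) :
    ∀ wc : PySem.Dict String Int, wc.keys.Nodup →
    (cls.foldl (fun count v => count.insert v (count.getD v 0 + 1)) wc).keys.Nodup := by
  induction cls with
  | nil => intro wc h; exact h
  | cons v cls ih => intro wc h; exact ih _ (PySem.Dict.nodup_keys_insert wc v _ h)

theorem nodup_keys_bCount (d : List (List String)) : (bCount d).keys.Nodup := by
  unfold bCount
  have : ∀ wc : PySem.Dict String Int, wc.keys.Nodup →
      (d.foldl (fun count cls =>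
        cls.foldl (fun count v => count.insert v (count.getD v 0 + 1)) count) wc).keys.Nodup := by
    induction d with
    | nil => intro wc h; exact h
    | cons c d ih => intro wc h; exact ih _ (nodup_inner c wc h)
  exact this _ PySem.Dict.nodup_keys_empty

-- ===== VERDICT (by name: the statement is the Claim_ definition above) =====
theorem delete_common_words_spec : Claim_equal_delete_common_words := by
  intro d _
  unfold Spec_delete_common_words delete_common_words delete_common_words_alt
  rw [aCount_eq_bCount]
  rw [foldl_map_comm (bCount d) (PySem.Dict.keys (bCount d)) d]
  apply List.map_congr_left
  intro cls hcls
  rw [rmFold_eq, PySem.List.slice_from_one]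
  show List.take 1 cls ++ eFold (bCount d) (bCount d).keys cls.tail =
    List.take 1 cls ++ (List.foldl (fun (st : PySem.Set String × List String) w =>
      if 2 ≤ (bCount d).getD w 0 ∧ st.1.contains w = false then (st.1.add w, st.2)
      else (st.1, st.2 ++ [w])) (PySem.Set.empty, []) cls.tail).2
  rw [bFold_pair, List.nil_append]
  congr 1
  apply eFold_eq_bTail (bCount d) cls.tail (PySem.Dict.keys (bCount d)) PySem.Set.empty
    (nodup_keys_bCount d)
  intro w hw
  constructor
  · intro _
    simp [PySem.Set.empty]
  · intro _
    exact (PySem.Dict.contains_iff_mem_keys (bCount d) w).1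
      (contains_bCount d cls w hcls (List.mem_of_mem_tail hw))
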